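-- pv_equiv track=rewrite | github.com/NuranR/2d-chess-piece-classifier | app.py | predictions_to_fen
-- ===== SOURCE A (Python) =====
-- PIECE_MAP = {
--     0: '1',   # Empty square
--     1: 'P', 2: 'N', 3: 'B', 4: 'R', 5: 'Q', 6: 'K',  # White pieces
--     7: 'p', 8: 'n', 9: 'b', 10: 'r', 11: 'q', 12: 'k'  # Black pieces
-- }
--
-- def predictions_to_fen(predictions):
--     fen = ""
--
--     for row in range(8):
--         empty_count = 0
--         row_preds = predictions[row * 8:(row + 1) * 8]
--
--         for pred in row_preds:
--             piece = PIECE_MAP.get(pred, '1')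
--
--             if piece == '1':  # Empty square
--                 empty_count += 1
--             else:
--                 if empty_count > 0:
--                     fen += str(empty_count)
--                     empty_count = 0
--                 fen += piece
--
--         # Add remaining empty squares
--         if empty_count > 0:
--             fen += str(empty_count)
--
--         # Add rank separator (except after last rank)
--         if row < 7:
--             fen += '/'
--
--     return fen
-- ===== SOURCE B (Python) =====
-- PIECE_MAP = {
--     0: '1',   # Empty square
--     1: 'P', 2: 'N', 3: 'B', 4: 'R', 5: 'Q', 6: 'K',  # White pieces
--     7: 'p', 8: 'n', 9: 'b', 10: 'r', 11: 'q', 12: 'k'  # Black pieces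
-- }
--
-- def _compress(s):
--     # run-length compress: each maximal run of '1' becomes its length
--     out = []
--     i = 0
--     while i < len(s):
--         j = i
--         while j < len(s) and s[j] == s[i]:
--             j += 1
--         out.append(str(j - i) if s[i] == '1' else s[i:j])
--         i = j
--     return ''.join(out)
--
-- def predictions_to_fen(predictions):
--     ranks = []
--     for row in range(8):
--         raw = ''.join(PIECE_MAP.get(p, '1') for p in predictions[row * 8:(row + 1) * 8])
--         ranks.append(_compress(raw))
--     return '/'.join(ranks)
-- ===== Notes on version B (the rewrite author's own statement) =====
-- stated objective: simpler
-- what changed: Replaces A's running empty-square counter threaded through the inner loop (with flush-before-piece and flush-at-rank-end) by a two-phase per-rank pipeline: map the 8 predictions to piece characters, run-length compress the '1' runs, and '/'-join the eight rank strings.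
import Mathlib
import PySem

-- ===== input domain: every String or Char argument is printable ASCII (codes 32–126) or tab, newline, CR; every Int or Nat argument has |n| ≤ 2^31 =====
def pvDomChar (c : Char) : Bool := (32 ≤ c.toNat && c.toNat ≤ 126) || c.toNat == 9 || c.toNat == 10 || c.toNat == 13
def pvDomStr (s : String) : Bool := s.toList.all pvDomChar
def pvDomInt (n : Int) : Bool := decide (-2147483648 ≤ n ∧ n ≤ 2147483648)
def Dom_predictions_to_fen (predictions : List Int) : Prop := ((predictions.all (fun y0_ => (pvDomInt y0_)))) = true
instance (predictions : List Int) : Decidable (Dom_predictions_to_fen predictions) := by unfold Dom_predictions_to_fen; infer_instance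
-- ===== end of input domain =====

-- B replaces A's running empty-square counter threaded through the inner loop by a two-phase
-- build-then-compress per rank (map to piece chars, run-length compress the '1' runs, join with '/');
-- objective: simpler decomposition, same cost.

-- ===== PORT A =====
def PIECE_MAP : PySem.Dict Int String := PySem.Dict.mk
  [(0, "1"), (1, "P"), (2, "N"), (3, "B"), (4, "R"), (5, "Q"), (6, "K"),
   (7, "p"), (8, "n"), (9, "b"), (10, "r"), (11, "q"), (12, "k")]

def stepA (s : String × Int) (pred : Int) : String × Int :=
  let piece := PySem.Dict.getD PIECE_MAP pred "1"
  if piece == "1" then (s.1, s.2 + 1)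
  else ((if s.2 > 0 then s.1 ++ PySem.Int.toStr s.2 else s.1) ++ piece, 0)

def rowA (fen : String) (row_preds : List Int) : String :=
  let s := row_preds.foldl stepA (fen, 0)
  if s.2 > 0 then s.1 ++ PySem.Int.toStr s.2 else s.1

def predictions_to_fen (predictions : List Int) : String :=
  (PySem.List.pyRange 0 8 1).foldl
    (fun fen row =>
      let f := rowA fen (PySem.List.slice predictions (some (row * 8)) (some ((row + 1) * 8)))
      if row < 7 then f ++ "/" else f) ""

-- ===== PORT B =====
def pieceChr (p : Int) : Char :=
  if p = 1 then 'P' else if p = 2 then 'N' else if p = 3 then 'B' else if p = 4 then 'R'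
  else if p = 5 then 'Q' else if p = 6 then 'K' else if p = 7 then 'p' else if p = 8 then 'n'
  else if p = 9 then 'b' else if p = 10 then 'r' else if p = 11 then 'q' else if p = 12 then 'k'
  else '1'

-- run-length compress: each maximal run of '1' becomes its length, other runs are kept verbatim
def compressRun : List Char → String
  | [] => ""
  | c :: rest =>
    let run := rest.takeWhile (· == c)
    let rest' := rest.dropWhile (· == c)
    (if c = '1' then PySem.Int.toStr ((run.length : Int) + 1) else String.ofList (c :: run)) ++
      compressRun rest'
termination_by l => l.length
decreasing_by
  simp only [List.length_cons]
  have := List.length_dropWhile_le (· == c) rest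
  omega

def predictions_to_fen_alt (predictions : List Int) : String :=
  PySem.Str.join "/"
    ((PySem.List.pyRange 0 8 1).map (fun row =>
      compressRun
        ((PySem.List.slice predictions (some (row * 8)) (some ((row + 1) * 8))).map pieceChr)))

-- ===== PRECONDITION & SPEC =====
def Spec_predictions_to_fen (predictions : List Int) (out : String) : Prop := out = predictions_to_fen_alt predictions
instance (predictions : List Int) (out : String) : Decidable (Spec_predictions_to_fen predictions out) := by unfold Spec_predictions_to_fen; infer_instance

-- ===== CLAIM (what is proved, stated in full; the proofs are below) =====
def Claim_equal_predictions_to_fen : Prop := ∀ (predictions : List Int), Dom_predictions_to_fen predictions → Spec_predictions_to_fen predictions (predictions_to_fen predictions)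

-- ===== LEMMAS AND PROOFS =====

lemma pieceChr_default (p : Int) (h : ¬(0 ≤ p ∧ p ≤ 12)) : pieceChr p = '1' := by
  simp only [pieceChr, if_neg (show ¬p = 1 by omega), if_neg (show ¬p = 2 by omega),
    if_neg (show ¬p = 3 by omega), if_neg (show ¬p = 4 by omega), if_neg (show ¬p = 5 by omega),
    if_neg (show ¬p = 6 by omega), if_neg (show ¬p = 7 by omega), if_neg (show ¬p = 8 by omega),
    if_neg (show ¬p = 9 by omega), if_neg (show ¬p = 10 by omega), if_neg (show ¬p = 11 by omega),
    if_neg (show ¬p = 12 by omega)]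

lemma pieceStr_eq (p : Int) : PySem.Dict.getD PIECE_MAP p "1" = String.ofList [pieceChr p] := by
  by_cases h : 0 ≤ p ∧ p ≤ 12
  · obtain ⟨h1, h2⟩ := h
    interval_cases p <;> decide
  · rw [PySem.Dict.getD_of_not_contains, pieceChr_default p h]
    simp [PIECE_MAP, PySem.Dict.contains_mk]
    omega

lemma ofList_eq_one_iff (c : Char) :
    (String.ofList [c] == "1") = decide (c = '1') := by
  by_cases h : c = '1'
  · subst h; decide
  · have hne : String.ofList [c] ≠ "1" := fun hc =>
      h (by simpa using congrArg String.toList hc)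
    simp [h, hne]

lemma stepA_eq (s : String × Int) (p : Int) :
    stepA s p = if pieceChr p = '1' then (s.1, s.2 + 1)
      else ((if s.2 > 0 then s.1 ++ PySem.Int.toStr s.2 else s.1) ++ String.ofList [pieceChr p], 0) := by
  simp only [stepA, pieceStr_eq, ofList_eq_one_iff]
  by_cases h : pieceChr p = '1' <;> simp [h]

def closeS (s : String × Int) : String :=
  if s.2 > 0 then s.1 ++ PySem.Int.toStr s.2 else s.1

lemma takeWhile_repl (m : Nat) (c : Char) (l : List Char) (h : (c == '1') = false) :
    List.takeWhile (· == '1') (List.replicate m '1' ++ c :: l) = List.replicate m '1' := by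
  induction m with
  | zero => simp [h]
  | succ m ih => simp [List.replicate_succ, ih]

lemma dropWhile_repl (m : Nat) (c : Char) (l : List Char) (h : (c == '1') = false) :
    List.dropWhile (· == '1') (List.replicate m '1' ++ c :: l) = c :: l := by
  induction m with
  | zero => simp [h]
  | succ m ih => simp [List.replicate_succ, ih]

lemma compressRun_replicate (n : Nat) :
    compressRun (List.replicate n '1') = if n = 0 then "" else PySem.Int.toStr (n : Int) := by
  cases n with
  | zero => simp [compressRun]
  | succ m =>
    rw [List.replicate_succ, compressRun]
    simp [compressRun]

lemma compress_skip_ones (n : Nat) (c : Char) (l : List Char) (hc : ¬ c = '1') :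
    compressRun (List.replicate n '1' ++ c :: l) =
      (if n = 0 then "" else PySem.Int.toStr (n : Int)) ++ compressRun (c :: l) := by
  have hb : (c == '1') = false := by simpa using hc
  cases n with
  | zero => simp
  | succ m =>
    rw [List.replicate_succ, List.cons_append, compressRun]
    simp [takeWhile_repl m c l hb, dropWhile_repl m c l hb]

lemma compress_cons_nonone (c : Char) (l : List Char) (hc : ¬ c = '1') :
    compressRun (c :: l) = String.ofList [c] ++ compressRun l := by
  cases l with
  | nil => simp [compressRun, hc]
  | cons d l' =>
    by_cases hd : d = c
    · subst hd
      rw [compressRun]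
      conv_rhs => rw [compressRun]
      apply String.toList_inj.mp
      simp [hc]
    · rw [compressRun]
      have hb : (d == c) = false := by simpa using hd
      simp [hb, hc]

lemma close_foldl (preds : List Int) :
    ∀ (fen : String) (n : Nat),
      closeS (preds.foldl stepA (fen, (n : Int)))
      = fen ++ compressRun (List.replicate n '1' ++ preds.map pieceChr) := by
  induction preds with
  | nil =>
    intro fen n
    simp only [List.foldl_nil, List.map_nil, List.append_nil, compressRun_replicate, closeS]
    by_cases h : n = 0
    · subst h; simp
    · simp [h]
  | cons p ps ih =>
    intro fen n
    simp only [List.foldl_cons, List.map_cons, stepA_eq]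
    by_cases hc : pieceChr p = '1'
    · rw [if_pos hc]
      have hcast : ((n : Int) + 1) = ((n + 1 : Nat) : Int) := by push_cast; ring
      rw [hcast, ih fen (n + 1), hc,
        show List.replicate n '1' ++ '1' :: ps.map pieceChr
            = List.replicate (n + 1) '1' ++ ps.map pieceChr from by
          rw [List.replicate_succ']; simp]
    · rw [if_neg hc]
      have h0 := ih ((if (n : Int) > 0 then fen ++ PySem.Int.toStr (n : Int) else fen) ++
        String.ofList [pieceChr p]) 0
      rw [Nat.cast_zero] at h0
      rw [h0, compress_skip_ones n (pieceChr p) (ps.map pieceChr) hc,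
        compress_cons_nonone (pieceChr p) (ps.map pieceChr) hc]
      apply String.toList_inj.mp
      by_cases h : n = 0
      · subst h; simp
      · simp [Nat.pos_of_ne_zero h, h]

lemma rowA_eq (fen : String) (preds : List Int) :
    rowA fen preds = fen ++ compressRun (preds.map pieceChr) := by
  have h := close_foldl preds fen 0
  rw [Nat.cast_zero] at h
  simpa [rowA, closeS] using h

lemma pyRange8 : PySem.List.pyRange 0 8 1 = [0, 1, 2, 3, 4, 5, 6, 7] := by decide

-- ===== VERDICT (by name: the statement is the Claim_ definition above) =====
theorem predictions_to_fen_spec : Claim_equal_predictions_to_fen := by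
  intro predictions _
  show predictions_to_fen predictions = predictions_to_fen_alt predictions
  unfold predictions_to_fen predictions_to_fen_alt
  rw [pyRange8]
  simp only [List.foldl_cons, List.foldl_nil, List.map_cons, List.map_nil, rowA_eq]
  norm_num [PySem.Str.join]
  apply String.toList_inj.mp
  simp [PySem.Chars.join, List.intercalate]
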